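-- pv_equiv track=rewrite | github.com/longxudou/Misc_Learning | Sequence_Classification/divide.py | merge_interval_based_on_tag
-- ===== SOURCE A (Python) =====
-- def merge_interval_based_on_tag(interval_list):
--     result=[]
--     tmp=[interval_list[0]]
--     for interval in interval_list[1:]:
--         if interval[-1]==tmp[-1][-1]:
--             tmp.append(interval)
--         else:
--             merge_interval = (f'{tmp[0][0].split("-")[0]}-{tmp[-1][0].split("-")[1]}',
--                               tmp[0][1],
--                               tmp[-1][2],
--                               ''.join([i[3] for i in tmp]),
--                               tmp[0][-1])
--             result.append(merge_interval)
--             tmp=[interval]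
--     if tmp!=[]:
--         merge_interval = (f'{tmp[0][0].split("-")[0]}-{tmp[-1][0].split("-")[1]}',
--                           tmp[0][1],
--                           tmp[-1][2],
--                           ''.join([i[3] for i in tmp]),
--                           tmp[0][-1])
--         result.append(merge_interval)
--     return result
-- ===== SOURCE B (Python) =====
-- def merge_interval_based_on_tag(interval_list):
--     # Slice-based run scanner: peel off each maximal same-tag prefix of the
--     # remaining list and merge it in one step.
--     result = []
--     rest = interval_list
--     while rest:
--         head = rest[0]
--         k = 1
--         while k < len(rest) and rest[k][-1] == head[-1]:
--             k += 1
--         run, rest = rest[:k], rest[k:]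
--         result.append((run[0][0].split('-')[0] + '-' + run[-1][0].split('-')[1],
--                        run[0][1],
--                        run[-1][2],
--                        ''.join(i[3] for i in run),
--                        run[0][-1]))
--     return result
-- ===== Notes on version B (the rewrite author's own statement) =====
-- stated objective: simpler
-- what changed: Replaces A's single pass with a running (result, tmp) buffer and a trailing flush by a scanner that repeatedly finds the end of the current same-tag run, slices it off and merges it in one step, so there is no buffer state and no duplicated merge expression.
import Mathlib
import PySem

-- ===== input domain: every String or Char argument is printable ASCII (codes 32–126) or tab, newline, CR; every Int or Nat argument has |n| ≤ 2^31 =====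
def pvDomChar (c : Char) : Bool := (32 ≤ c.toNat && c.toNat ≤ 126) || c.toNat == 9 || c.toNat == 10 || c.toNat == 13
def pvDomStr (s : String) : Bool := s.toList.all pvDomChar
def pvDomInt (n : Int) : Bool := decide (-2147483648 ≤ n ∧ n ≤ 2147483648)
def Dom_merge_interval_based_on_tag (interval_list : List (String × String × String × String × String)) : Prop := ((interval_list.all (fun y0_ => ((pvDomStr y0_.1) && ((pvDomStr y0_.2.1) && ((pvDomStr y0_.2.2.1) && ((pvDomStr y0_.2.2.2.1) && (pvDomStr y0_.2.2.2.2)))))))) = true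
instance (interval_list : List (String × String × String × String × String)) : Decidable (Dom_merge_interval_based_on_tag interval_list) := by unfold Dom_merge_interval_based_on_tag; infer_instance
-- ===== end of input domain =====

-- B replaces A's running (result, tmp) accumulator pair by a slice-based scanner that
-- repeatedly peels off the maximal same-tag prefix of the remaining list (objective: simpler).
-- A raises IndexError on [] and when a run-final first field has no '-'; those inputs are outside Pre_.

-- ===== PORT A =====
-- interval[-1] of a 5-tuple = the 5th component
def pvTag (x : String × String × String × String × String) : String := x.2.2.2.2

-- the merge_interval tuple A (and B) build from a buffered run; tmp[0]/tmp[-1]/split indexing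
-- via PySem (the .getD defaults are unreachable under Pre_: tmp ≠ [] and run-final fields contain '-')
def pvMergeRun (run : List (String × String × String × String × String)) : String × String × String × String × String :=
  let first := (PySem.List.pyGet? run 0).getD ("", "", "", "", "")
  let last  := (PySem.List.pyGet? run (-1)).getD ("", "", "", "", "")
  (((PySem.List.pyGet? ((PySem.Str.split? first.1 "-").getD []) 0).getD "") ++ "-" ++
     ((PySem.List.pyGet? ((PySem.Str.split? last.1 "-").getD []) 1).getD ""),
   first.2.1,
   last.2.2.1,
   PySem.Str.join "" (run.map (fun i => i.2.2.2.1)),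
   pvTag first)

-- A's for-loop over interval_list[1:], state (result, tmp); compares interval[-1] to tmp[-1][-1]
def pvLoopA (result tmp : List (String × String × String × String × String)) :
    List (String × String × String × String × String) →
    List (String × String × String × String × String) × List (String × String × String × String × String)
  | [] => (result, tmp)
  | interval :: rest =>
    if pvTag interval == (((PySem.List.pyGet? tmp (-1)).map pvTag).getD "") then
      pvLoopA result (tmp ++ [interval]) rest
    else
      pvLoopA (result ++ [pvMergeRun tmp]) [interval] rest

def merge_interval_based_on_tag (interval_list : List (String × String × String × String × String)) : List (String × String × String × String × String) :=
  match interval_list with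
  | [] => []  -- Python A raises IndexError at interval_list[0]; excluded by Pre_
  | x :: xs =>
    let rt := pvLoopA [] [x] xs
    if rt.2 ≠ [] then rt.1 ++ [pvMergeRun rt.2] else rt.1

-- ===== PORT B =====
-- Source B's outer while peels the maximal same-tag prefix (rest[:k]) and recurses on rest[k:]
def merge_interval_based_on_tag_alt (interval_list : List (String × String × String × String × String)) : List (String × String × String × String × String) :=
  match interval_list with
  | [] => []
  | head :: tl =>
    pvMergeRun (head :: tl.takeWhile (fun y => pvTag y == pvTag head)) ::
    merge_interval_based_on_tag_alt (tl.dropWhile (fun y => pvTag y == pvTag head))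
termination_by interval_list.length
decreasing_by
  simp only [List.length_cons]
  exact Nat.lt_succ_of_le (List.length_dropWhile_le _ _)

-- ===== PRECONDITION & SPEC =====
-- Pre_ = exactly where Python A returns: a nonempty list whose run-final elements (last of the
-- list, or tag differing from the successor's) have a '-' in their first field (else IndexError).
def Pre_merge_interval_based_on_tag (interval_list : List (String × String × String × String × String)) : Prop :=
  interval_list ≠ [] ∧
  ∀ i < interval_list.length,
    ((i + 1 = interval_list.length ∨
        pvTag (interval_list.getD i ("", "", "", "", "")) ≠ pvTag (interval_list.getD (i + 1) ("", "", "", "", ""))) →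
      '-' ∈ (interval_list.getD i ("", "", "", "", "")).1.toList)
instance (interval_list : List (String × String × String × String × String)) : Decidable (Pre_merge_interval_based_on_tag interval_list) := by unfold Pre_merge_interval_based_on_tag; infer_instance

def pvWitness_merge_interval_based_on_tag : (List (String × String × String × String × String)) := [("1-2", "a", "b", "x", "T")]

def Spec_merge_interval_based_on_tag (interval_list : List (String × String × String × String × String)) (out : List (String × String × String × String × String)) : Prop := out = merge_interval_based_on_tag_alt interval_list
instance (interval_list : List (String × String × String × String × String)) (out : List (String × String × String × String × String)) : Decidable (Spec_merge_interval_based_on_tag interval_list out) := by unfold Spec_merge_interval_based_on_tag; infer_instance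

-- ===== CLAIM (what is proved, stated in full; the proofs are below) =====
def Claim_equal_merge_interval_based_on_tag : Prop := ∀ (interval_list : List (String × String × String × String × String)), Dom_merge_interval_based_on_tag interval_list → Pre_merge_interval_based_on_tag interval_list → Spec_merge_interval_based_on_tag interval_list (merge_interval_based_on_tag interval_list)

-- ===== LEMMAS AND PROOFS =====

def pvFinish (rt : List (String × String × String × String × String) × List (String × String × String × String × String)) : List (String × String × String × String × String) :=
  if rt.2 ≠ [] then rt.1 ++ [pvMergeRun rt.2] else rt.1

theorem pvAlt_nil : merge_interval_based_on_tag_alt [] = [] := by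
  rw [merge_interval_based_on_tag_alt]

theorem pvAlt_cons (x : String × String × String × String × String) (xs : List (String × String × String × String × String)) :
    merge_interval_based_on_tag_alt (x :: xs) =
      pvMergeRun (x :: xs.takeWhile (fun y => pvTag y == pvTag x)) ::
      merge_interval_based_on_tag_alt (xs.dropWhile (fun y => pvTag y == pvTag x)) := by
  rw [merge_interval_based_on_tag_alt]

theorem pvTakeWhile_all {α : Type} (p : α → Bool) (l₁ l₂ : List α) (h : ∀ y ∈ l₁, p y = true) :
    (l₁ ++ l₂).takeWhile p = l₁ ++ l₂.takeWhile p := by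
  induction l₁ with
  | nil => simp
  | cons a l ih =>
    simp only [List.cons_append, List.takeWhile_cons, h a (by simp), ih (fun y hy => h y (by simp [hy]))]
    simp

theorem pvDropWhile_all {α : Type}(p : α → Bool) (l₁ l₂ : List α) (h : ∀ y ∈ l₁, p y = true) :
    (l₁ ++ l₂).dropWhile p = l₂.dropWhile p := by
  induction l₁ with
  | nil => simp
  | cons a l ih =>
    simp only [List.cons_append, List.dropWhile_cons, h a (by simp), if_pos, ih (fun y hy => h y (by simp [hy]))]

theorem pvLastTag : ∀ (ts : List (String × String × String × String × String))
    (t : String × String × String × String × String),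
    (∀ y ∈ ts, pvTag y = pvTag t) →
    ((PySem.List.pyGet? (t :: ts) (-1)).map pvTag).getD "" = pvTag t := by
  intro ts
  induction ts with
  | nil => intro t _; rw [PySem.List.pyGet?_neg_one]; simp
  | cons y ys ih =>
    intro t h
    rw [PySem.List.pyGet?_neg_one, List.getLast?_cons_cons]
    have hy := h y (by simp)
    have := ih y (fun z hz => (h z (by simp [hz])).trans hy.symm)
    rw [PySem.List.pyGet?_neg_one] at this
    rw [this, hy]

theorem pvMain (xs : List (String × String × String × String × String)) :
    ∀ (result : List (String × String × String × String × String))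
      (t : String × String × String × String × String)
      (ts : List (String × String × String × String × String)),
      (∀ y ∈ ts, pvTag y = pvTag t) →
      pvFinish (pvLoopA result (t :: ts) xs) =
        result ++ merge_interval_based_on_tag_alt (t :: (ts ++ xs)) := by
  induction xs with
  | nil =>
    intro result t ts h
    rw [pvLoopA, List.append_nil, pvAlt_cons]
    have htake : ts.takeWhile (fun y => pvTag y == pvTag t) = ts := by
      have := pvTakeWhile_all (fun y => pvTag y == pvTag t) ts [] (fun y hy => by simp [h y hy])
      simpa using this
    have hdrop : ts.dropWhile (fun y => pvTag y == pvTag t) = [] := by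
      have := pvDropWhile_all (fun y => pvTag y == pvTag t) ts ([] : List _) (fun y hy => by simp [h y hy])
      simpa using this
    rw [htake, hdrop, pvAlt_nil, pvFinish]
    simp
  | cons i xs' ih =>
    intro result t ts h
    rw [pvLoopA, pvLastTag ts t h]
    by_cases hti : pvTag i = pvTag t
    · rw [if_pos (by simp [hti])]
      have h' : ∀ y ∈ ts ++ [i], pvTag y = pvTag t := by
        intro y hy
        rcases List.mem_append.1 hy with hy | hy
        · exact h y hy
        · simp at hy; simp [hy, hti]
      rw [List.cons_append, ih result t (ts ++ [i]) h']
      simp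
    · rw [if_neg (by simp [hti])]
      conv_rhs => rw [pvAlt_cons]
      rw [ih (result ++ [pvMergeRun (t :: ts)]) i [] (by simp)]
      have htake : (ts ++ i :: xs').takeWhile (fun y => pvTag y == pvTag t) = ts := by
        rw [pvTakeWhile_all (fun y => pvTag y == pvTag t) ts (i :: xs') (fun y hy => by simp [h y hy])]
        simp [hti]
      have hdrop : (ts ++ i :: xs').dropWhile (fun y => pvTag y == pvTag t) = i :: xs' := by
        rw [pvDropWhile_all (fun y => pvTag y == pvTag t) ts (i :: xs') (fun y hy => by simp [h y hy])]
        simp [hti]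
      rw [htake, hdrop]
      simp

-- ===== VERDICT (by name: the statement is the Claim_ definition above) =====
theorem merge_interval_based_on_tag_spec : Claim_equal_merge_interval_based_on_tag := by
  intro interval_list _ hpre
  unfold Spec_merge_interval_based_on_tag
  match interval_list with
  | [] => exact absurd rfl hpre.1
  | x :: xs =>
    have := pvMain xs [] x [] (by simp)
    simpa [merge_interval_based_on_tag, pvFinish] using this
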